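-- pv_equiv track=rewrite | github.com/MauriceCalvert/andante | builder/domain/harmony_ops.py | has_consonant_tone
-- ===== SOURCE A (Python) =====
-- def is_consonant_diatonic(deg1_idx: int, deg2_idx: int) -> bool:
--     """Check if two diatonic indices (0-6) are consonant.
--
--     Dissonant intervals: 2nd and 7th (which invert to each other).
--     All other intervals (unison, 3rd, 4th, 5th, 6th) are consonant.
--
--     Args:
--         deg1_idx: First scale degree index (0-6)
--         deg2_idx: Second scale degree index (0-6)
--
--     Returns:
--         True if interval is consonant
--     """
--     interval: int = abs(deg1_idx - deg2_idx)
--     # Handle inversion (7th becomes 2nd, etc.)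
--     interval = min(interval, 7 - interval)
--     # Only 2nd/7th (interval=1) is dissonant
--     return interval != 1
--
-- def has_consonant_tone(
--     chord_tone_indices: tuple[int, ...],
--     melody_indices: list[int],
-- ) -> bool:
--     """Check if any chord tone is consonant with ALL melody notes.
--
--     For a chord to work with the melody, at least one of its tones
--     must not create a dissonant interval with any melody note.
--
--     Args:
--         chord_tone_indices: 0-6 indices for chord tones (root, 3rd, 5th)
--         melody_indices: 0-6 indices for all melody notes in the bar
--
--     Returns:
--         True if any chord tone is consonant with all melody notes
--     """
--     # Empty melody is compatible with any chord
--     if not melody_indices: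
--         return True
--
--     for tone_idx in chord_tone_indices:
--         # Check if this tone is consonant with ALL melody notes
--         all_consonant: bool = all(
--             is_consonant_diatonic(tone_idx, melody_idx)
--             for melody_idx in melody_indices
--         )
--         if all_consonant:
--             return True
--
--     return False
-- ===== SOURCE B (Python) =====
-- def has_consonant_tone(chord_tone_indices, melody_indices):
--     # Empty melody is compatible with any chord
--     if not melody_indices:
--         return True
--     # Every degree forming a dissonant 2nd/7th with some melody note
--     forbidden = {m + d for m in melody_indices for d in (-6, -1, 1, 6)}
--     return any(tone not in forbidden for tone in chord_tone_indices)
-- ===== Notes on version B (the rewrite author's own statement) =====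
-- stated objective: simpler
-- what changed: Replaces the nested per-tone all() scan over melody notes with a forbidden-degree set {m+d : d in {-6,-1,1,6}} built once, then one flat membership pass over the chord tones.
import Mathlib
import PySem

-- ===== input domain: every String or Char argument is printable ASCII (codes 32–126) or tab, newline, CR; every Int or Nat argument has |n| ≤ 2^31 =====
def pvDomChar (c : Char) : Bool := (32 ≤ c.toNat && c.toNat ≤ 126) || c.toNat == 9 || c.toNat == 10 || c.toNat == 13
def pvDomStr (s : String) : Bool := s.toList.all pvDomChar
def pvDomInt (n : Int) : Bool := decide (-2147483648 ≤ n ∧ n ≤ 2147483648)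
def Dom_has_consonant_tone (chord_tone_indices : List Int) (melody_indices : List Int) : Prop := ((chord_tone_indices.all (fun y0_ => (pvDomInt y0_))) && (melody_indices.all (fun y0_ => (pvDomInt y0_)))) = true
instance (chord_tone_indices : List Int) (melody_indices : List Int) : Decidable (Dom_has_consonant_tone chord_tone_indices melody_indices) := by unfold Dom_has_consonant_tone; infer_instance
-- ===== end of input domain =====

-- ===== PORT A =====
-- One honest line: B precomputes a forbidden-degree set and does one flat pass, instead of A's nested all() scan.
def is_consonant_diatonic (deg1_idx : Int) (deg2_idx : Int) : Bool :=
  let interval : Int := |deg1_idx - deg2_idx|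
  let interval2 : Int := min interval (7 - interval)
  interval2 != 1

def has_consonant_tone (chord_tone_indices : List Int) (melody_indices : List Int) : Bool :=
  if melody_indices = [] then true
  else
    -- 'for tone in …: if all(…): return True / return False' as an early-exit any
    chord_tone_indices.any (fun tone_idx =>
      melody_indices.all (fun melody_idx => is_consonant_diatonic tone_idx melody_idx))

-- ===== PORT B =====
def has_consonant_tone_alt (chord_tone_indices : List Int) (melody_indices : List Int) : Bool :=
  if melody_indices = [] then true
  else
    let forbidden : PySem.Set Int :=
      PySem.Set.ofList (melody_indices.flatMap (fun m => [m + -6, m + -1, m + 1, m + 6]))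
    chord_tone_indices.any (fun tone => !(PySem.Set.contains forbidden tone))

-- ===== PRECONDITION & SPEC =====
def Spec_has_consonant_tone (chord_tone_indices : List Int) (melody_indices : List Int) (out : Bool) : Prop := out = has_consonant_tone_alt chord_tone_indices melody_indices
instance (chord_tone_indices : List Int) (melody_indices : List Int) (out : Bool) : Decidable (Spec_has_consonant_tone chord_tone_indices melody_indices out) := by unfold Spec_has_consonant_tone; infer_instance

-- ===== CLAIM (what is proved, stated in full; the proofs are below) =====
def Claim_equal_has_consonant_tone : Prop := ∀ (chord_tone_indices : List Int) (melody_indices : List Int), Dom_has_consonant_tone chord_tone_indices melody_indices → Spec_has_consonant_tone chord_tone_indices melody_indices (has_consonant_tone chord_tone_indices melody_indices)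

-- ===== LEMMAS AND PROOFS =====

-- ===== VERDICT (by name: the statement is the Claim_ definition above) =====
-- a tone is dissonant with m exactly when it is one of m±1, m±6
lemma consonant_iff (t m : Int) :
    is_consonant_diatonic t m = false ↔ t ∈ [m + -6, m + -1, m + 1, m + 6] := by
  simp [is_consonant_diatonic, min_def, abs]
  omega

lemma all_iff_not_forbidden (t : Int) (ms : List Int) :
    ms.all (fun m => is_consonant_diatonic t m)
      = !(PySem.Set.contains
          (PySem.Set.ofList (ms.flatMap (fun m => [m + -6, m + -1, m + 1, m + 6]))) t) := by
  rcases h : (ms.all (fun m => is_consonant_diatonic t m)) with _ | _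
  · simp only [List.all_eq_false] at h
    obtain ⟨m, hm, hf⟩ := h
    simp only [Bool.not_eq_true] at hf
    have ht := (consonant_iff t m).1 hf
    have : t ∈ ms.flatMap (fun m => [m + -6, m + -1, m + 1, m + 6]) :=
      List.mem_flatMap.2 ⟨m, hm, ht⟩
    simp [PySem.Set.contains, PySem.Set.mem_ofList, this]
  · simp only [List.all_eq_true] at h
    suffices hh : t ∉ ms.flatMap (fun m => [m + -6, m + -1, m + 1, m + 6]) by
      simp [PySem.Set.contains, PySem.Set.mem_ofList, hh]
    intro hmem
    obtain ⟨m, hm, ht⟩ := List.mem_flatMap.1 hmem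
    have := h m hm
    rw [(consonant_iff t m).2 ht] at this
    exact Bool.false_ne_true this

-- ===== VERDICT (by name: the statement is the Claim_ definition above) =====
theorem has_consonant_tone_spec : Claim_equal_has_consonant_tone := by
  intro c ms _
  unfold Spec_has_consonant_tone has_consonant_tone has_consonant_tone_alt
  by_cases h : ms = []
  · simp [h]
  · simp only [h]
    exact congrArg c.any (funext fun t => all_iff_not_forbidden t ms)
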